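-- pv_equiv track=rewrite | github.com/averagepetey/reddalert | backend/app/services/matcher.py | _find_phrase_matches
-- ===== SOURCE A (Python) =====
-- from typing import Optional
--
-- def _find_phrase_matches(
--     stemmed_tokens: list[str],
--     token_offsets: list[int],
--     tokens: list[str],
--     phrase_stemmed: list[str],
--     proximity_window: int,
--     require_order: bool,
-- ) -> list[list[int]]:
--     """Find all occurrences of a phrase within the token list.
--
--     For single-token phrases, returns each position where the token appears.
--     For multi-token phrases, finds combinations within the proximity window.
--
--     Returns a list of lists, where each inner list contains the token indices
--     that form a match.
--     """
--     if len(phrase_stemmed) == 1: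
--         # Single-token phrase: find all occurrences
--         target = phrase_stemmed[0]
--         return [[i] for i, t in enumerate(stemmed_tokens) if t == target]
--
--     # Multi-token phrase: find positions of each phrase token
--     token_positions: list[list[int]] = []
--     for pt in phrase_stemmed:
--         positions = [i for i, t in enumerate(stemmed_tokens) if t == pt]
--         if not positions:
--             return []  # A required token is missing entirely
--         token_positions.append(positions)
--
--     # Find valid combinations within proximity window
--     # Use the first token's positions as anchors and search for combinations
--     matches: list[list[int]] = []
--     for anchor_pos in token_positions[0]:
--         combo = _find_combination(
--             token_positions=token_positions,
--             anchor_pos=anchor_pos,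
--             proximity_window=proximity_window,
--             require_order=require_order,
--             current_combo=[anchor_pos],
--             token_idx=1,
--         )
--         if combo is not None:
--             matches.append(combo)
--
--     return matches
--
-- def _find_combination(
--     token_positions: list[list[int]],
--     anchor_pos: int,
--     proximity_window: int,
--     require_order: bool,
--     current_combo: list[int],
--     token_idx: int,
-- ) -> Optional[list[int]]:
--     """Recursively find a valid token combination within the proximity window."""
--     if token_idx >= len(token_positions):
--         return current_combo
--
--     for pos in token_positions[token_idx]:
--         # Check proximity: all tokens must be within proximity_window of each other
--         all_positions = current_combo + [pos]
--         span = max(all_positions) - min(all_positions)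
--         if span >= proximity_window:
--             continue
--
--         # Check ordering if required
--         if require_order and pos <= current_combo[-1]:
--             continue
--
--         # Avoid using the same position twice
--         if pos in current_combo:
--             continue
--
--         result = _find_combination(
--             token_positions=token_positions,
--             anchor_pos=anchor_pos,
--             proximity_window=proximity_window,
--             require_order=require_order,
--             current_combo=all_positions,
--             token_idx=token_idx + 1,
--         )
--         if result is not None:
--             return result
--
--     return None
-- ===== SOURCE B (Python) =====
-- from typing import Optional
--
--
-- def _find_phrase_matches(
--     stemmed_tokens: list[str],
--     token_offsets: list[int],
--     tokens: list[str],
--     phrase_stemmed: list[str],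
--     proximity_window: int,
--     require_order: bool,
-- ) -> list[list[int]]:
--     """One-pass token->positions index, then a combination search whose
--     candidates are narrowed to the proximity interval by binary search."""
--     index: dict[str, list[int]] = {}
--     for i, t in enumerate(stemmed_tokens):
--         index.setdefault(t, []).append(i)
--
--     if len(phrase_stemmed) == 1:
--         return [[i] for i in index.get(phrase_stemmed[0], [])]
--
--     token_positions: list[list[int]] = []
--     for pt in phrase_stemmed:
--         ps = index.get(pt)
--         if ps is None:
--             return []
--         token_positions.append(ps)
--
--     matches: list[list[int]] = []
--     for anchor in token_positions[0]:
--         combo = _search(token_positions, 1, [anchor], anchor, anchor,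
--                         proximity_window, require_order)
--         if combo is not None:
--             matches.append(combo)
--     return matches
--
--
-- def _bisect_left(a: list[int], x: int) -> int:
--     lo, hi = 0, len(a)
--     while lo < hi:
--         mid = (lo + hi) // 2
--         if a[mid] < x:
--             lo = mid + 1
--         else:
--             hi = mid
--     return lo
--
--
-- def _search(
--     token_positions: list[list[int]],
--     token_idx: int,
--     combo: list[int],
--     lo_val: int,
--     hi_val: int,
--     proximity_window: int,
--     require_order: bool,
-- ) -> Optional[list[int]]:
--     # lo_val/hi_val are min(combo)/max(combo), maintained incrementally.
--     if token_idx == len(token_positions):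
--         return combo
--     ps = token_positions[token_idx]
--     lo = hi_val - proximity_window + 1
--     if require_order and combo[-1] + 1 > lo:
--         lo = combo[-1] + 1
--     hi = lo_val + proximity_window
--     for p in ps[_bisect_left(ps, lo):_bisect_left(ps, hi)]:
--         if p in combo:
--             continue
--         r = _search(token_positions, token_idx + 1, combo + [p],
--                     min(lo_val, p), max(hi_val, p),
--                     proximity_window, require_order)
--         if r is not None:
--             return r
--     return None
-- ===== Notes on version B (the rewrite author's own statement) =====
-- stated objective: alternative
-- what changed: B builds a token->positions dict index in one pass instead of scanning stemmed_tokens once per phrase token, and at each level of the combination search it maintains the combo's min/max incrementally and narrows the candidate positions to the proximity interval by binary search instead of filtering every position with a recomputed max/min span.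
import Mathlib
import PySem

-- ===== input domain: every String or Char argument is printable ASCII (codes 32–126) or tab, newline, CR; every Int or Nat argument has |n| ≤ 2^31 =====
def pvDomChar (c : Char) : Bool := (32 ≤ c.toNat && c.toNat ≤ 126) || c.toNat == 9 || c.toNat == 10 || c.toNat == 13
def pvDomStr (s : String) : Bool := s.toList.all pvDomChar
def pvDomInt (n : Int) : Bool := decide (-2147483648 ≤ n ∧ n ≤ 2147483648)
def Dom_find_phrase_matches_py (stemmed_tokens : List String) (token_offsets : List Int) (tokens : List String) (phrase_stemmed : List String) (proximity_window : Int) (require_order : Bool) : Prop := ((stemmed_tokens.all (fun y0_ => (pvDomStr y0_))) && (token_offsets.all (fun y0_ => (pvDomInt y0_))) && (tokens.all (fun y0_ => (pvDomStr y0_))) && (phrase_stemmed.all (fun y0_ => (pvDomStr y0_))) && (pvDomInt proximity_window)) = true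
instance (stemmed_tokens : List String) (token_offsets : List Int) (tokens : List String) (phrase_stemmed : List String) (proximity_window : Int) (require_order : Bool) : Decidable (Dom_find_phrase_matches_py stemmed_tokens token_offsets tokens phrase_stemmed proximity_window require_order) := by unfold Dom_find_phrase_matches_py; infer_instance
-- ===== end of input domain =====

-- B replaces A's per-phrase-token scans by a dict index built in one pass and narrows each
-- level of the combination search to the proximity interval by binary search over the sorted
-- position lists, maintaining the combo's min/max incrementally (objective: alternative).

-- ===== PORT A =====

-- combo[-1] (combo is always nonempty where this is used)
def pvLast (l : List Int) : Int := (PySem.List.pyGet? l (-1)).getD 0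
-- max(l) / min(l) (l is always nonempty where these are used)
def pvMaxI (l : List Int) : Int := (PySem.List.max? l (fun y => y)).getD 0
def pvMinI (l : List Int) : Int := (PySem.List.min? l (fun y => y)).getD 0

-- [i for i, t in enumerate(stemmed_tokens) if t == pt]
def pvA_positions (st : List String) (pt : String) : List Int :=
  ((PySem.List.enumerate st 0).filter (fun it => it.2 == pt)).map (fun it => it.1)

-- the gathering loop with its early 'return []' (none = a required token is missing)
def pvA_gather (st : List String) : List String → Option (List (List Int))
  | [] => some []
  | pt :: pts =>
    let ps := pvA_positions st pt
    if ps.isEmpty then none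
    else
      match pvA_gather st pts with
      | none => none
      | some rest => some (ps :: rest)

mutual
-- _find_combination, recursing on the remaining position lists (token_positions[token_idx:])
def pvA_findCombo (w : Int) (ro : Bool) (tps : List (List Int)) (combo : List Int) :
    Option (List Int) :=
  match tps with
  | [] => some combo
  | ps :: rest => pvA_scan w ro rest combo ps
termination_by (tps.length, 0)

-- the 'for pos in token_positions[token_idx]' loop
def pvA_scan (w : Int) (ro : Bool) (rest : List (List Int)) (combo : List Int) (ps : List Int) :
    Option (List Int) :=
  match ps with
  | [] => none
  | p :: ps' =>
    let allPos := combo ++ [p]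
    if pvMaxI allPos - pvMinI allPos ≥ w then pvA_scan w ro rest combo ps'
    else if ro && decide (p ≤ pvLast combo) then pvA_scan w ro rest combo ps'
    else if combo.contains p then pvA_scan w ro rest combo ps'
    else
      match pvA_findCombo w ro rest allPos with
      | some r => some r
      | none => pvA_scan w ro rest combo ps'
termination_by (rest.length, ps.length + 1)
end

def find_phrase_matches_py (stemmed_tokens : List String) (token_offsets : List Int) (tokens : List String) (phrase_stemmed : List String) (proximity_window : Int) (require_order : Bool) : List (List Int) :=
  if phrase_stemmed.length == 1 then
    ((PySem.List.enumerate stemmed_tokens 0).filter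
        (fun it => it.2 == phrase_stemmed.headD "")).map (fun it => [it.1])
  else
    match pvA_gather stemmed_tokens phrase_stemmed with
    | none => []
    | some tps =>
      match tps with
      | [] => []  -- phrase_stemmed = []: Python raises IndexError here; excluded by Pre_
      | first :: rest =>
        first.foldl (fun ms anchor =>
          match pvA_findCombo proximity_window require_order rest [anchor] with
          | some c => ms ++ [c]
          | none => ms) []

-- ===== PORT B =====

-- index.setdefault(t, []).append(i) over enumerate(stemmed_tokens)
def pvB_index (st : List String) : PySem.Dict String (List Int) :=
  (PySem.List.enumerate st 0).foldl
    (fun d it => d.modify it.2 [] (fun v => v ++ [it.1])) PySem.Dict.empty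

-- hand-written _bisect_left's while loop
def pvB_bisectGo (a : List Int) (x : Int) (lo hi : Int) : Int :=
  if lo < hi then
    let mid := PySem.Int.floordiv (lo + hi) 2
    if PySem.List.pyGetD a mid 0 < x then pvB_bisectGo a x (mid + 1) hi
    else pvB_bisectGo a x lo mid
  else lo
termination_by (hi - lo).toNat
decreasing_by
  all_goals
    have h2 : PySem.Int.floordiv (lo + hi) 2 = (lo + hi) / 2 :=
      PySem.Int.floordiv_eq_ediv_of_pos (by omega)
    simp only [h2]
    omega

def pvB_bisect (a : List Int) (x : Int) : Int := pvB_bisectGo a x 0 a.length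

-- the gathering loop over index.get(pt) with its early 'return []'
def pvB_gather (d : PySem.Dict String (List Int)) : List String → Option (List (List Int))
  | [] => some []
  | pt :: pts =>
    match d.get? pt with
    | none => none
    | some ps =>
      match pvB_gather d pts with
      | none => none
      | some rest => some (ps :: rest)

mutual
-- _search: combination search with incrementally maintained min/max bounds m, M
def pvB_search (w : Int) (ro : Bool) (tps : List (List Int)) (combo : List Int) (m M : Int) :
    Option (List Int) :=
  match tps with
  | [] => some combo
  | ps :: rest =>
    let lo0 := M - w + 1
    let lo := if ro && decide (pvLast combo + 1 > lo0) then pvLast combo + 1 else lo0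
    let hi := m + w
    pvB_scan w ro rest combo m M
      (PySem.List.slice ps (some (pvB_bisect ps lo)) (some (pvB_bisect ps hi)))
termination_by (tps.length, 0)

-- the 'for p in ps[bisect:bisect]' loop
def pvB_scan (w : Int) (ro : Bool) (rest : List (List Int)) (combo : List Int) (m M : Int)
    (cand : List Int) : Option (List Int) :=
  match cand with
  | [] => none
  | p :: cs =>
    if combo.contains p then pvB_scan w ro rest combo m M cs
    else
      match pvB_search w ro rest (combo ++ [p]) (min m p) (max M p) with
      | some r => some r
      | none => pvB_scan w ro rest combo m M cs
termination_by (rest.length, cand.length + 1)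
end

def find_phrase_matches_py_alt (stemmed_tokens : List String) (token_offsets : List Int) (tokens : List String) (phrase_stemmed : List String) (proximity_window : Int) (require_order : Bool) : List (List Int) :=
  let index := pvB_index stemmed_tokens
  if phrase_stemmed.length == 1 then
    (index.getD (phrase_stemmed.headD "") []).map (fun i => [i])
  else
    match pvB_gather index phrase_stemmed with
    | none => []
    | some tps =>
      match tps with
      | [] => []  -- phrase_stemmed = []: Python raises IndexError here; excluded by Pre_
      | first :: rest =>
        first.foldl (fun ms anchor =>
          match pvB_search proximity_window require_order rest [anchor] anchor anchor with
          | some c => ms ++ [c]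
          | none => ms) []

-- ===== PRECONDITION & SPEC =====

-- Pre_ excludes only phrase_stemmed = [], on which the Python A raises IndexError
-- (token_positions[0] on an empty list).
def Pre_find_phrase_matches_py (stemmed_tokens : List String) (token_offsets : List Int) (tokens : List String) (phrase_stemmed : List String) (proximity_window : Int) (require_order : Bool) : Prop :=
  phrase_stemmed ≠ []
instance (stemmed_tokens : List String) (token_offsets : List Int) (tokens : List String) (phrase_stemmed : List String) (proximity_window : Int) (require_order : Bool) : Decidable (Pre_find_phrase_matches_py stemmed_tokens token_offsets tokens phrase_stemmed proximity_window require_order) := by unfold Pre_find_phrase_matches_py; infer_instance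

def pvWitness_find_phrase_matches_py : List String × List Int × List String × List String × Int × Bool :=
  (["the", "quick", "fox", "quick"], [0, 4, 10, 14], ["the", "quick", "fox", "quick"],
   ["quick", "fox"], 3, false)

def Spec_find_phrase_matches_py (stemmed_tokens : List String) (token_offsets : List Int) (tokens : List String) (phrase_stemmed : List String) (proximity_window : Int) (require_order : Bool) (out : List (List Int)) : Prop := out = find_phrase_matches_py_alt stemmed_tokens token_offsets tokens phrase_stemmed proximity_window require_order
instance (stemmed_tokens : List String) (token_offsets : List Int) (tokens : List String) (phrase_stemmed : List String) (proximity_window : Int) (require_order : Bool) (out : List (List Int)) : Decidable (Spec_find_phrase_matches_py stemmed_tokens token_offsets tokens phrase_stemmed proximity_window require_order out) := by unfold Spec_find_phrase_matches_py; infer_instance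

-- ===== CLAIM (what is proved, stated in full; the proofs are below) =====
def Claim_equal_find_phrase_matches_py : Prop := ∀ (stemmed_tokens : List String) (token_offsets : List Int) (tokens : List String) (phrase_stemmed : List String) (proximity_window : Int) (require_order : Bool), Dom_find_phrase_matches_py stemmed_tokens token_offsets tokens phrase_stemmed proximity_window require_order → Pre_find_phrase_matches_py stemmed_tokens token_offsets tokens phrase_stemmed proximity_window require_order → Spec_find_phrase_matches_py stemmed_tokens token_offsets tokens phrase_stemmed proximity_window require_order (find_phrase_matches_py stemmed_tokens token_offsets tokens phrase_stemmed proximity_window require_order)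

-- ===== LEMMAS AND PROOFS =====

-- generic facts about takeWhile used for bisection

theorem pv_takeWhile_len_le (l : List Int) (P : Int → Bool) :
    (l.takeWhile P).length ≤ l.length :=
  (List.takeWhile_prefix P).length_le

theorem pv_takeWhile_getElem (l : List Int) (P : Int → Bool) (i : Nat)
    (h : i < (l.takeWhile P).length) :
    P (l[i]'(Nat.lt_of_lt_of_le h (pv_takeWhile_len_le l P))) = true := by
  have hg := (List.takeWhile_prefix P (l := l)).getElem (i := i) h
  have hm := List.mem_takeWhile_imp (List.getElem_mem h)
  rwa [hg] at hm

theorem pv_takeWhile_next (l : List Int) (P : Int → Bool)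
    (h : (l.takeWhile P).length < l.length) :
    P (l[(l.takeWhile P).length]) = false := by
  induction l with
  | nil => simp at h
  | cons a t ih =>
      rw [List.takeWhile_cons] at *
      by_cases hp : P a
      · simp [hp] at h ⊢; exact ih h
      · simp [hp]

-- the index built by B holds exactly A's comprehension for every token

theorem pv_getD_fold (l : List (Int × String)) (d : PySem.Dict String (List Int)) (pt : String) :
    (l.foldl (fun d it => d.modify it.2 [] (fun v => v ++ [it.1])) d).getD pt [] =
      d.getD pt [] ++ (l.filter (fun it => it.2 == pt)).map (fun it => it.1) := by
  induction l using List.reverseRecOn with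
  | nil => simp
  | append_singleton l x ih =>
      rw [List.foldl_append]
      simp only [List.foldl_cons, List.foldl_nil, List.filter_append, List.map_append]
      rw [PySem.Dict.getD_modify]
      by_cases h : pt = x.2
      · subst h
        have hfx : List.filter (fun it => it.2 == x.2) [x] = [x] := by simp
        rw [hfx]
        simp [ih]
      · have hb : (x.2 == pt) = false := by simp [Ne.symm h]
        have hfx : List.filter (fun it => it.2 == pt) [x] = [] := by
          rw [List.filter_singleton, hb]
          rfl
        rw [if_neg h, hfx]
        have hmn : List.map (fun it : Int × String => it.1) ([] : List (Int × String)) = [] := rfl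
        rw [ih, hmn, List.append_nil]

theorem pv_get?_fold (l : List (Int × String)) (pt : String) :
    (l.foldl (fun d it => d.modify it.2 [] (fun v => v ++ [it.1]))
        (PySem.Dict.empty : PySem.Dict String (List Int))).get? pt =
      if ((l.filter (fun it => it.2 == pt)).map (fun it => it.1)) = [] then none
      else some ((l.filter (fun it => it.2 == pt)).map (fun it => it.1)) := by
  induction l using List.reverseRecOn with
  | nil => simp
  | append_singleton l x ih =>
      rw [List.foldl_append]
      simp only [List.foldl_cons, List.foldl_nil, List.filter_append, List.map_append]
      have hmod : ∀ (d : PySem.Dict String (List Int)),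
          d.modify x.2 [] (fun v => v ++ [x.1]) = d.insert x.2 (d.getD x.2 [] ++ [x.1]) :=
        fun _ => rfl
      rw [hmod, PySem.Dict.get?_insert]
      by_cases h : pt = x.2
      · have hgd := pv_getD_fold l (PySem.Dict.empty : PySem.Dict String (List Int)) x.2
        rw [PySem.Dict.getD_empty] at hgd
        subst h
        have hfx : List.filter (fun it => it.2 == x.2) [x] = [x] := by simp
        rw [if_pos rfl, hfx]
        simp [hgd]
      · have hb : (x.2 == pt) = false := by simp [Ne.symm h]
        have hfx : List.filter (fun it => it.2 == pt) [x] = [] := by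
          rw [List.filter_singleton, hb]
          rfl
        rw [if_neg h, hfx]
        have hmn : List.map (fun it : Int × String => it.1) ([] : List (Int × String)) = [] := rfl
        rw [ih, hmn, List.append_nil]

theorem pvB_index_getD (st : List String) (pt : String) :
    (pvB_index st).getD pt [] = pvA_positions st pt := by
  unfold pvB_index pvA_positions
  rw [pv_getD_fold]
  simp

theorem pvB_index_get? (st : List String) (pt : String) :
    (pvB_index st).get? pt =
      if (pvA_positions st pt).isEmpty then none else some (pvA_positions st pt) := by
  unfold pvB_index pvA_positions
  rw [pv_get?_fold]
  by_cases hA : List.map (fun it => it.1)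
      (List.filter (fun it => it.2 == pt) (PySem.List.enumerate st 0)) = []
  · rw [if_pos hA, if_pos (List.isEmpty_iff.mpr hA)]
  · rw [if_neg hA, if_neg (fun hc => hA (List.isEmpty_iff.mp hc))]

theorem pv_gather_eq (st : List String) (phrase : List String) :
    pvB_gather (pvB_index st) phrase = pvA_gather st phrase := by
  induction phrase with
  | nil => rfl
  | cons pt pts ih =>
      simp only [pvB_gather, pvA_gather]
      rw [pvB_index_get?]
      by_cases hemp : (pvA_positions st pt).isEmpty
      · simp [hemp]
      · simp [hemp, ih]

theorem pvA_positions_sorted (st : List String) (pt : String) :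
    (pvA_positions st pt).Pairwise (· < ·) := by
  unfold pvA_positions
  exact List.pairwise_map.mpr
    ((PySem.List.pairwise_lt_enumerate st 0).filter (fun it => it.2 == pt))

theorem pvA_gather_sorted (st : List String) (phrase : List String) (tps : List (List Int))
    (h : pvA_gather st phrase = some tps) : ∀ l ∈ tps, l.Pairwise (· < ·) := by
  induction phrase generalizing tps with
  | nil => simp only [pvA_gather] at h; cases h; simp
  | cons pt pts ih =>
      simp only [pvA_gather] at h
      by_cases hemp : (pvA_positions st pt).isEmpty
      · simp [hemp] at h
      · rw [if_neg hemp] at h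
        cases hrec : pvA_gather st pts with
        | none => rw [hrec] at h; simp at h
        | some rest =>
            rw [hrec] at h
            simp only [Option.some.injEq] at h
            cases h
            intro l hl
            rcases List.mem_cons.mp hl with h1 | h1
            · cases h1; exact pvA_positions_sorted st pt
            · exact ih rest hrec l h1

-- correctness of the hand-written bisection loop

theorem pvB_bisectGo_eq (a : List Int) (x : Int) (hs : a.Pairwise (· < ·)) (lo hi : Int)
    (h0 : 0 ≤ lo) (hlh : lo ≤ hi) (hhi : hi ≤ (a.length : Int))
    (hlow : ∀ i : Nat, (i : Int) < lo → ∀ h : i < a.length, a[i] < x)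
    (hhigh : ∀ i : Nat, hi ≤ (i : Int) → ∀ h : i < a.length, ¬ a[i] < x) :
    pvB_bisectGo a x lo hi = ((a.takeWhile (fun p => decide (p < x))).length : Int) := by
  have hmono : ∀ (i j : Nat) (hj : j < a.length) (hij : i < j), a[i]'(by omega) < a[j] :=
    fun i j hj hij => List.pairwise_iff_getElem.mp hs i j (by omega) hj hij
  have key : ∀ (n : Nat) (lo hi : Int), (hi - lo).toNat = n → 0 ≤ lo → lo ≤ hi →
      hi ≤ (a.length : Int) →
      (∀ i : Nat, (i : Int) < lo → ∀ h : i < a.length, a[i] < x) →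
      (∀ i : Nat, hi ≤ (i : Int) → ∀ h : i < a.length, ¬ a[i] < x) →
      pvB_bisectGo a x lo hi = ((a.takeWhile (fun p => decide (p < x))).length : Int) := by
    intro n
    induction n using Nat.strong_induction_on with
    | _ n ihn =>
      intro lo hi hn h0 hlh hhi hlow hhigh
      rw [pvB_bisectGo]
      set T := (a.takeWhile (fun p => decide (p < x))).length with hT
      have hTle : T ≤ a.length := pv_takeWhile_len_le a _
      split
      case isTrue hlt =>
        have hfd : PySem.Int.floordiv (lo + hi) 2 = (lo + hi) / 2 :=
          PySem.Int.floordiv_eq_ediv_of_pos (by omega)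
        simp only [hfd]
        set mid : Int := (lo + hi) / 2 with hmid
        have hb1 : lo ≤ mid := by omega
        have hb2 : mid < hi := by omega
        have hmlen : mid.toNat < a.length := by omega
        rw [PySem.List.pyGetD_eq_getElem a 0 (by omega) (by omega)]
        split
        case isTrue hax =>
          refine ihn ((hi - (mid + 1)).toNat) (by omega) (mid + 1) hi rfl (by omega)
            (by omega) hhi ?_ hhigh
          intro i hi2 hilen
          rcases Nat.lt_or_ge i mid.toNat with hc | hc
          · exact lt_trans (hmono i mid.toNat hmlen hc) hax
          · have : i = mid.toNat := by omega
            subst this; exact hax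
        case isFalse hax =>
          refine ihn ((mid - lo).toNat) (by omega) lo mid rfl h0 (by omega) (by omega) hlow ?_
          intro i hi2 hilen
          rcases Nat.lt_or_ge mid.toNat i with hc | hc
          · have := hmono mid.toNat i hilen hc
            omega
          · have : i = mid.toNat := by omega
            subst this; exact hax
      case isFalse hlt =>
        have hlohi : lo = hi := by omega
        by_contra hne
        rcases Nat.lt_or_ge T lo.toNat with hc | hc
        · have hTlen : T < a.length := by omega
          have h1 := hlow T (by omega) hTlen
          have h2 := pv_takeWhile_next a (fun p => decide (p < x)) hTlen
          have h3 : decide (a[T]'hTlen < x) = false := h2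
          simp at h3
          omega
        · have hTc : lo.toNat < T := by omega
          have h1 := pv_takeWhile_getElem a (fun p => decide (p < x)) lo.toNat hTc
          have h2 := hhigh lo.toNat (by omega) (by omega)
          simp at h1
          omega
  exact key ((hi - lo).toNat) lo hi rfl h0 hlh hhi hlow hhigh

theorem pvB_bisect_eq (a : List Int) (x : Int) (hs : a.Pairwise (· < ·)) :
    pvB_bisect a x = ((a.takeWhile (fun p => decide (p < x))).length : Int) := by
  unfold pvB_bisect
  refine pvB_bisectGo_eq a x hs 0 (a.length : Int) (by omega) (by omega) (by omega) ?_ ?_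
  · intro i hi _; omega
  · intro i hi h; omega

theorem pv_tw_slice (ps : List Int) (hs : ps.Pairwise (· < ·)) (lo hi : Int) :
    List.take ((ps.takeWhile (fun p => decide (p < hi))).length
        - (ps.takeWhile (fun p => decide (p < lo))).length)
      (List.drop ((ps.takeWhile (fun p => decide (p < lo))).length) ps) =
      ps.filter (fun p => decide (lo ≤ p) && decide (p < hi)) := by
  induction ps with
  | nil => simp
  | cons p t ih =>
      obtain ⟨hall, ht⟩ := List.pairwise_cons.mp hs
      have iht := ih ht
      rw [List.takeWhile_cons, List.takeWhile_cons]
      by_cases h1 : p < lo <;> by_cases h2 : p < hi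
      · have hfail : ¬ lo ≤ p := by omega
        simp [h1, h2, hfail, iht]
      · -- hi ≤ p < lo : everything from here on is ≥ hi
        have hfail : ¬ p < hi := h2
        have hrest : t.filter (fun q => decide (lo ≤ q) && decide (q < hi)) = [] := by
          rw [List.filter_eq_nil_iff]
          intro q hq
          have := hall q hq
          simp; omega
        simp [h1, h2, hrest]
      · -- lo ≤ p < hi : keep p, and takeWhile (< lo) of t is empty
        have hok : lo ≤ p := by omega
        have htlo : t.takeWhile (fun q => decide (q < lo)) = [] := by
          cases t with
          | nil => rfl
          | cons q t' =>
              have := hall q (by simp)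
              rw [List.takeWhile_cons]
              simp; omega
        rw [htlo] at iht
        simp only [List.length_nil, Nat.sub_zero, List.drop_zero] at iht
        simp [h1, h2, hok, iht]
      · -- lo ≤ p, hi ≤ p : nothing matches any more
        have hrest : t.filter (fun q => decide (lo ≤ q) && decide (q < hi)) = [] := by
          rw [List.filter_eq_nil_iff]
          intro q hq
          have := hall q hq
          simp; omega
        simp [h1, h2, hrest]

theorem pv_slice_bisect (ps : List Int) (hs : ps.Pairwise (· < ·)) (lo hi : Int) :
    PySem.List.slice ps (some (pvB_bisect ps lo)) (some (pvB_bisect ps hi)) =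
      ps.filter (fun p => decide (lo ≤ p) && decide (p < hi)) := by
  rw [pvB_bisect_eq ps lo hs, pvB_bisect_eq ps hi hs, PySem.List.slice_natCast]
  exact pv_tw_slice ps hs lo hi

-- max / min of a nonempty list, and how they move under appending one element

theorem pvMaxI_spec (c : List Int) (hc : c ≠ []) :
    pvMaxI c ∈ c ∧ ∀ y ∈ c, y ≤ pvMaxI c := by
  cases h : PySem.List.max? c (fun y => y) with
  | none => exact absurd ((PySem.List.max?_eq_none_iff c _).mp h) hc
  | some M =>
      unfold pvMaxI
      rw [h]
      exact ⟨PySem.List.max?_mem h, PySem.List.max?_isMax h⟩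

theorem pvMinI_spec (c : List Int) (hc : c ≠ []) :
    pvMinI c ∈ c ∧ ∀ y ∈ c, pvMinI c ≤ y := by
  cases h : PySem.List.min? c (fun y => y) with
  | none => exact absurd ((PySem.List.min?_eq_none_iff c _).mp h) hc
  | some m =>
      unfold pvMinI
      rw [h]
      exact ⟨PySem.List.min?_mem h, PySem.List.min?_isMin h⟩

theorem pvMaxI_append (c : List Int) (p : Int) (hc : c ≠ []) :
    pvMaxI (c ++ [p]) = max (pvMaxI c) p := by
  obtain ⟨hKmem, hKmax⟩ := pvMaxI_spec (c ++ [p]) (by simp)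
  obtain ⟨hMmem, hMmax⟩ := pvMaxI_spec c hc
  have h1 : pvMaxI c ≤ pvMaxI (c ++ [p]) := hKmax _ (List.mem_append_left _ hMmem)
  have h2 : p ≤ pvMaxI (c ++ [p]) := hKmax p (by simp)
  rcases List.mem_append.mp hKmem with h3 | h3
  · have := hMmax _ h3
    omega
  · simp at h3
    omega

theorem pvMinI_append (c : List Int) (p : Int) (hc : c ≠ []) :
    pvMinI (c ++ [p]) = min (pvMinI c) p := by
  obtain ⟨hKmem, hKmin⟩ := pvMinI_spec (c ++ [p]) (by simp)
  obtain ⟨hMmem, hMmin⟩ := pvMinI_spec c hc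
  have h1 : pvMinI (c ++ [p]) ≤ pvMinI c := hKmin _ (List.mem_append_left _ hMmem)
  have h2 : pvMinI (c ++ [p]) ≤ p := hKmin p (by simp)
  rcases List.mem_append.mp hKmem with h3 | h3
  · have := hMmin _ h3
    omega
  · simp at h3
    omega

theorem pvMinI_le_pvMaxI (c : List Int) (hc : c ≠ []) : pvMinI c ≤ pvMaxI c := by
  obtain ⟨hm, -⟩ := pvMinI_spec c hc
  obtain ⟨-, hM⟩ := pvMaxI_spec c hc
  exact hM _ hm

theorem pvMaxI_singleton (a : Int) : pvMaxI [a] = a := by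
  unfold pvMaxI
  rw [PySem.List.max?_id_cons]
  simp

theorem pvMinI_singleton (a : Int) : pvMinI [a] = a := by
  unfold pvMinI
  rw [PySem.List.min?_id_cons]
  simp

-- the two scanning loops agree once the candidate filter is characterised

theorem pv_scan_eq (w : Int) (ro : Bool) (rest : List (List Int)) (combo : List Int)
    (m M : Int) (P : Int → Bool)
    (hIH : ∀ p, P p = true → combo.contains p = false →
      pvA_findCombo w ro rest (combo ++ [p]) =
        pvB_search w ro rest (combo ++ [p]) (min m p) (max M p))
    (hP : ∀ p, P p = true ↔
      ¬ (pvMaxI (combo ++ [p]) - pvMinI (combo ++ [p]) ≥ w) ∧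
      ¬ (ro = true ∧ p ≤ pvLast combo)) :
    ∀ ps : List Int, pvA_scan w ro rest combo ps = pvB_scan w ro rest combo m M (ps.filter P) := by
  intro ps
  induction ps with
  | nil => simp [pvA_scan, pvB_scan]
  | cons p ps' ih =>
      rw [pvA_scan, List.filter_cons]
      by_cases hp : P p = true
      · obtain ⟨hspan, horder⟩ := (hP p).mp hp
        have hb : (ro && decide (p ≤ pvLast combo)) = false := by
          rcases Bool.eq_false_or_eq_true ro with h | h
          · have hnle : ¬ p ≤ pvLast combo := fun hle => horder ⟨h, hle⟩
            simp [h]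
            omega
          · simp [h]
        rw [if_neg hspan, hb]
        simp only [Bool.false_eq_true, if_false, hp, if_true]
        rw [pvB_scan]
        cases hc : combo.contains p
        · simp only [Bool.false_eq_true, if_false]
          rw [hIH p hp hc]
          cases hsr : pvB_search w ro rest (combo ++ [p]) (min m p) (max M p) with
          | some r => rfl
          | none => exact ih
        · simp only [if_true]
          exact ih
      · simp only [hp, Bool.false_eq_true, if_false]
        by_cases hs1 : pvMaxI (combo ++ [p]) - pvMinI (combo ++ [p]) ≥ w
        · rw [if_pos hs1]; exact ih
        · have horder : ro = true ∧ p ≤ pvLast combo := by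
            by_contra hh
            exact hp ((hP p).mpr ⟨hs1, hh⟩)
          have hb : (ro && decide (p ≤ pvLast combo)) = true := by
            simp [horder.1, horder.2]
          rw [if_neg hs1, hb]
          simp only [if_true]
          exact ih

theorem pvA_gather_nil (st : List String) (ph : List String)
    (h : pvA_gather st ph = some []) : ph = [] := by
  cases ph with
  | nil => rfl
  | cons pt pts =>
      simp only [pvA_gather] at h
      by_cases hemp : (pvA_positions st pt).isEmpty
      · rw [if_pos hemp] at h; cases h
      · rw [if_neg hemp] at h
        cases hrec : pvA_gather st pts with
        | none => rw [hrec] at h; cases h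
        | some rest => rw [hrec] at h; simp at h

theorem pv_main_eq (w : Int) (ro : Bool) (tps : List (List Int)) :
    ∀ combo : List Int, combo ≠ [] → (∀ l ∈ tps, l.Pairwise (· < ·)) →
    (pvMaxI combo - pvMinI combo < w ∨ w ≤ 0) →
    pvA_findCombo w ro tps combo = pvB_search w ro tps combo (pvMinI combo) (pvMaxI combo) := by
  induction tps with
  | nil => intro combo _ _ _; simp [pvA_findCombo, pvB_search]
  | cons ps rest ih =>
      intro combo hne hsort hinv
      have hmM : pvMinI combo ≤ pvMaxI combo := pvMinI_le_pvMaxI combo hne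
      have hPiff : ∀ p : Int,
          ((decide ((if ro && decide (pvLast combo + 1 > pvMaxI combo - w + 1)
              then pvLast combo + 1 else pvMaxI combo - w + 1) ≤ p)
            && decide (p < pvMinI combo + w)) = true) ↔
          ¬ (pvMaxI (combo ++ [p]) - pvMinI (combo ++ [p]) ≥ w) ∧
          ¬ (ro = true ∧ p ≤ pvLast combo) := by
        intro p
        rw [pvMaxI_append combo p hne, pvMinI_append combo p hne]
        rcases Bool.eq_false_or_eq_true ro with hro | hro
        · simp [hro]
          split_ifs with hc <;> omega
        · simp [hro]
          omega
      simp only [pvA_findCombo, pvB_search]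
      rw [pv_slice_bisect ps (hsort ps List.mem_cons_self) _ _]
      refine pv_scan_eq w ro rest combo (pvMinI combo) (pvMaxI combo) _ ?_ hPiff ps
      intro p hPp _
      obtain ⟨hspan, -⟩ := (hPiff p).mp hPp
      have h1 := ih (combo ++ [p]) (by simp)
        (fun l hl => hsort l (List.mem_cons_of_mem _ hl))
        (by rw [pvMaxI_append combo p hne, pvMinI_append combo p hne]
            left
            rw [pvMaxI_append combo p hne, pvMinI_append combo p hne] at hspan
            omega)
      rw [pvMaxI_append combo p hne, pvMinI_append combo p hne] at h1
      exact h1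

-- ===== VERDICT (by name: the statement is the Claim_ definition above) =====
theorem find_phrase_matches_py_spec : Claim_equal_find_phrase_matches_py := by
  unfold Claim_equal_find_phrase_matches_py
  intro st toff tok ph w ro _ hpre
  unfold Spec_find_phrase_matches_py
  simp only [find_phrase_matches_py, find_phrase_matches_py_alt]
  cases h1 : (ph.length == 1)
  · simp only [Bool.false_eq_true, if_false]
    rw [pv_gather_eq st ph]
    cases hg : pvA_gather st ph with
    | none => rfl
    | some tps =>
        cases tps with
        | nil => exact absurd (pvA_gather_nil st ph hg) hpre
        | cons first rest =>
            have hsorted := pvA_gather_sorted st ph _ hg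
            have hcombo : ∀ a : Int,
                pvA_findCombo w ro rest [a] = pvB_search w ro rest [a] a a := by
              intro a
              have h := pv_main_eq w ro rest [a] (by simp)
                (fun l hl => hsorted l (List.mem_cons_of_mem _ hl))
                (by rw [pvMaxI_singleton, pvMinI_singleton]; omega)
              rwa [pvMaxI_singleton, pvMinI_singleton] at h
            simp only [hcombo]
  · simp only [if_true]
    rw [pvB_index_getD st (ph.headD "")]
    unfold pvA_positions
    rw [List.map_map]
    rfl
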